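-- pv_equiv track=rewrite | github.com/cxygiao/Transmission-Cost-Optimization-Dynamic-Look-Ahead | Utils/transmission_cost_calculation_2.py | judge_is_global_gate
-- ===== SOURCE A (Python) =====
-- def judge_is_global_gate(gate,cut_point,circuit_qubit):
--     cut_list_one = []
--     cut_list_two = []
--     # 第一个分区的所有量子位集合
--     for i in range(cut_point):
--         cut_list_one.append(i)
--     # 第二个分区的所有量子位集合
--     for i in range(cut_point, circuit_qubit):
--         cut_list_two.append(i)
--     res1 = list(set(gate) & set(cut_list_one))
--     res2 = list(set(gate) & set(cut_list_two))
--     if (len(res1) == len(set(gate)) and (len(res2) == 0)) or (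
--             len(res2) == len(set(gate)) and (len(res1) == 0)):
--         is_global_gate = 0
--     else:
--         is_global_gate = 1
--     return is_global_gate
-- ===== SOURCE B (Python) =====
-- def judge_is_global_gate(gate, cut_point, circuit_qubit):
--     in_one = in_two = outside = False
--     for q in gate:
--         if 0 <= q < cut_point:
--             in_one = True
--         elif cut_point <= q < circuit_qubit:
--             in_two = True
--         else:
--             outside = True
--     if not outside and not (in_one and in_two):
--         return 0
--     return 1
-- ===== Notes on version B (the rewrite author's own statement) =====
-- stated objective: faster
-- what changed: Instead of materialising both partitions as lists of all qubits and intersecting sets with set(gate), B makes a single pass over the gate's qubits with three boolean flags (seen-in-partition-one / -two / outside) decided by range comparisons.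
import Mathlib
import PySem

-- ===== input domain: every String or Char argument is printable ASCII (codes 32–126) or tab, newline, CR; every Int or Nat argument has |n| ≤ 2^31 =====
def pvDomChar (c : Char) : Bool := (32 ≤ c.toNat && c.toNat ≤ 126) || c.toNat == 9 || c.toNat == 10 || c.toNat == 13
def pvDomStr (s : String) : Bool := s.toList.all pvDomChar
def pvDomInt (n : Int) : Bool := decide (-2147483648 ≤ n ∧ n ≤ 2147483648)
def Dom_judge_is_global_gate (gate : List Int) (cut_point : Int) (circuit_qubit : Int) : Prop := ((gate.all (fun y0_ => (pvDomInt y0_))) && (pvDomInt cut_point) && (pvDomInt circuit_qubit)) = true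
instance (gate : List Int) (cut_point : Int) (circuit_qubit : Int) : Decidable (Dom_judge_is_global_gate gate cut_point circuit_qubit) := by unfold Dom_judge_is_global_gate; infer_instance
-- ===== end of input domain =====

-- B replaces A's "build both partition lists, intersect each with set(gate)" by one pass over the
-- gate's qubits with three boolean flags decided by range comparisons (objective: faster).

-- ===== PORT A =====
def judge_is_global_gate (gate : List Int) (cut_point : Int) (circuit_qubit : Int) : Int :=
  -- for i in range(cut_point): cut_list_one.append(i)  — appends every element of the range in
  -- order, so cut_list_one is exactly list(range(cut_point)) = pyRange 0 cut_point 1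
  let cut_list_one : List Int := PySem.List.pyRange 0 cut_point 1
  -- for i in range(cut_point, circuit_qubit): cut_list_two.append(i)
  let cut_list_two : List Int := PySem.List.pyRange cut_point circuit_qubit 1
  -- set(gate) & set(cut_list_one): PySem.Set.inter only queries MEMBERSHIP of its second
  -- argument (set(l) and l agree on membership), so passing the list itself is exact
  let res1 : List Int := PySem.Set.inter (PySem.Set.ofList gate) cut_list_one
  let res2 : List Int := PySem.Set.inter (PySem.Set.ofList gate) cut_list_two
  if (res1.length = (PySem.Set.ofList gate).length ∧ res2.length = 0) ∨
     (res2.length = (PySem.Set.ofList gate).length ∧ res1.length = 0) then 0 else 1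

-- ===== PORT B =====
-- the for-loop of Source B: three flags (in_one, in_two, outside)
def judgeAltLoop (cut_point : Int) (circuit_qubit : Int) : List Int → (Bool × Bool × Bool) → (Bool × Bool × Bool)
  | [], st => st
  | q :: rest, (in_one, in_two, outside) =>
      if 0 ≤ q ∧ q < cut_point then judgeAltLoop cut_point circuit_qubit rest (true, in_two, outside)
      else if cut_point ≤ q ∧ q < circuit_qubit then judgeAltLoop cut_point circuit_qubit rest (in_one, true, outside)
      else judgeAltLoop cut_point circuit_qubit rest (in_one, in_two, true)

def judge_is_global_gate_alt (gate : List Int) (cut_point : Int) (circuit_qubit : Int) : Int :=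
  let st := judgeAltLoop cut_point circuit_qubit gate (false, false, false)
  if st.2.2 = false ∧ ¬ (st.1 = true ∧ st.2.1 = true) then 0 else 1

-- ===== PRECONDITION & SPEC =====
def Spec_judge_is_global_gate (gate : List Int) (cut_point : Int) (circuit_qubit : Int) (out : Int) : Prop := out = judge_is_global_gate_alt gate cut_point circuit_qubit
instance (gate : List Int) (cut_point : Int) (circuit_qubit : Int) (out : Int) : Decidable (Spec_judge_is_global_gate gate cut_point circuit_qubit out) := by unfold Spec_judge_is_global_gate; infer_instance

-- ===== CLAIM (what is proved, stated in full; the proofs are below) =====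
def Claim_equal_judge_is_global_gate : Prop := ∀ (gate : List Int) (cut_point : Int) (circuit_qubit : Int), Dom_judge_is_global_gate gate cut_point circuit_qubit → Spec_judge_is_global_gate gate cut_point circuit_qubit (judge_is_global_gate gate cut_point circuit_qubit)

-- ===== LEMMAS AND PROOFS =====

-- the state of Source B's loop, in closed form
theorem judgeAltLoop_spec (cp cq : Int) (gate : List Int) (a b c : Bool) :
    judgeAltLoop cp cq gate (a, b, c) =
      (a || gate.any (fun q => decide (0 ≤ q ∧ q < cp)),
       b || gate.any (fun q => decide (cp ≤ q ∧ q < cq)),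
       c || gate.any (fun q => !(decide (0 ≤ q ∧ q < cp)) && !(decide (cp ≤ q ∧ q < cq)))) := by
  induction gate generalizing a b c with
  | nil => simp [judgeAltLoop]
  | cons q rest ih =>
    simp only [judgeAltLoop]
    split_ifs with h1 h2
    · rw [ih]
      simp only [List.any_cons, decide_eq_true h1,
        decide_eq_false (show ¬ (cp ≤ q ∧ q < cq) by omega)]
      simp
    · rw [ih]
      simp only [List.any_cons, decide_eq_true h2, decide_eq_false h1]
      simp
    · rw [ih]
      simp only [List.any_cons, decide_eq_false h1, decide_eq_false h2]
      simp

-- A's branch condition, in closed form over the gate's elements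
theorem judgeA_cond (gate : List Int) (cp cq : Int) :
    ((((PySem.Set.ofList gate).filter (fun x => PySem.Set.contains (PySem.List.pyRange 0 cp 1) x)).length = (PySem.Set.ofList gate).length ∧
      ((PySem.Set.ofList gate).filter (fun x => PySem.Set.contains (PySem.List.pyRange cp cq 1) x)).length = 0) ∨
     (((PySem.Set.ofList gate).filter (fun x => PySem.Set.contains (PySem.List.pyRange cp cq 1) x)).length = (PySem.Set.ofList gate).length ∧
      ((PySem.Set.ofList gate).filter (fun x => PySem.Set.contains (PySem.List.pyRange 0 cp 1) x)).length = 0))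
    ↔ ((∀ q ∈ gate, 0 ≤ q ∧ q < cp) ∨ (∀ q ∈ gate, cp ≤ q ∧ q < cq)) := by
  simp only [List.length_filter_eq_length_iff, List.length_eq_zero_iff, List.filter_eq_nil_iff]
  simp only [PySem.Set.contains_eq_listContains, List.contains_iff_mem,
    PySem.Set.mem_ofList, PySem.List.mem_pyRange_one, decide_eq_true_eq]
  constructor
  · rintro (⟨h1, _⟩ | ⟨h2, _⟩)
    · exact Or.inl h1
    · exact Or.inr h2
  · rintro (h1 | h2)
    · exact Or.inl ⟨h1, fun x hx hc => by have := h1 x hx; omega⟩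
    · exact Or.inr ⟨h2, fun x hx hc => by have := h2 x hx; omega⟩

-- ===== VERDICT (by name: the statement is the Claim_ definition above) =====
theorem judge_is_global_gate_spec : Claim_equal_judge_is_global_gate := by
  intro gate cp cq _
  unfold Spec_judge_is_global_gate judge_is_global_gate judge_is_global_gate_alt
  simp only [PySem.Set.inter, judgeAltLoop_spec, Bool.false_or]
  by_cases h : (∀ q ∈ gate, 0 ≤ q ∧ q < cp) ∨ (∀ q ∈ gate, cp ≤ q ∧ q < cq)
  · rw [if_pos ((judgeA_cond gate cp cq).mpr h), if_pos]
    simp only [List.any_eq_false, List.any_eq_true, decide_eq_true_eq, Bool.and_eq_true,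
      Bool.not_eq_true', decide_eq_false_iff_not]
    constructor
    · intro q hq
      rcases h with h1 | h2
      · have := h1 q hq; omega
      · have := h2 q hq; omega
    · rintro ⟨⟨q1, hq1, hp1⟩, q2, hq2, hp2⟩
      rcases h with h1 | h2
      · have := h1 q2 hq2; omega
      · have := h2 q1 hq1; omega
  · rw [if_neg (fun hc => h ((judgeA_cond gate cp cq).mp hc)), if_neg]
    intro ⟨hout, hmix⟩
    simp only [List.any_eq_false, Bool.not_eq_true, Bool.and_eq_false_iff,
      Bool.not_eq_true', decide_eq_false_iff_not] at hout
    -- every gate qubit lies in one of the two ranges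
    have hall : ∀ q ∈ gate, (0 ≤ q ∧ q < cp) ∨ (cp ≤ q ∧ q < cq) := by
      intro q hq
      have := hout q hq
      rcases this with h' | h'
      · left; simpa using of_decide_eq_true (by simpa using h')
      · right; simpa using of_decide_eq_true (by simpa using h')
    apply h
    by_cases hex : ∃ q ∈ gate, 0 ≤ q ∧ q < cp
    · left
      intro q hq
      rcases hall q hq with h' | h'
      · exact h'
      · exfalso
        rcases hex with ⟨q1, hq1, hp1⟩
        apply hmix
        constructor
        · simp only [List.any_eq_true, decide_eq_true_eq]; exact ⟨q1, hq1, hp1⟩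
        · simp only [List.any_eq_true, decide_eq_true_eq]; exact ⟨q, hq, h'⟩
    · right
      intro q hq
      rcases hall q hq with h' | h'
      · exact absurd ⟨q, hq, h'⟩ hex
      · exact h'
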